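-- pv_equiv track=rewrite | github.com/selmaam/cv-parser | update_skills.py | filter_abbrv
-- ===== SOURCE A (Python) =====
-- def filter_abbrv(strings):
--
--     to_remove = []
--
--     # Check if each string is a subset of any other string
--     for s1 in strings:
--         for s2 in strings:
--             if s1 != s2 and s1 in s2:
--                 to_remove.append(s1)
--                 break
--
--     return [string for string in strings if string not in to_remove]
-- ===== SOURCE B (Python) =====
-- def filter_abbrv(strings):
--     # Sort the distinct strings by length, longest first; scan group-by-group of
--     # equal length, testing each string only against the strictly longer ones
--     # already seen; then filter the original list by the removed values.
--     uniq = sorted(dict.fromkeys(strings), key=len, reverse=True)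
--     removed = set()
--     longer = []
--     i = 0
--     n = len(uniq)
--     while i < n:
--         j = i
--         while j < n and len(uniq[j]) == len(uniq[i]):
--             j += 1
--         group = uniq[i:j]
--         for s in group:
--             if any(s in t for t in longer):
--                 removed.add(s)
--         longer += group
--         i = j
--     return [s for s in strings if s not in removed]
-- ===== Notes on version B (the rewrite author's own statement) =====
-- stated objective: alternative
-- what changed: Replaces A's all-pairs value-inequality scan and list-membership filter by sorting the distinct strings by length (longest first) and scanning group-by-group of equal length, testing each string only against the strictly longer strings already seen, then filtering the original list through the removed set.
import Mathlib
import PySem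

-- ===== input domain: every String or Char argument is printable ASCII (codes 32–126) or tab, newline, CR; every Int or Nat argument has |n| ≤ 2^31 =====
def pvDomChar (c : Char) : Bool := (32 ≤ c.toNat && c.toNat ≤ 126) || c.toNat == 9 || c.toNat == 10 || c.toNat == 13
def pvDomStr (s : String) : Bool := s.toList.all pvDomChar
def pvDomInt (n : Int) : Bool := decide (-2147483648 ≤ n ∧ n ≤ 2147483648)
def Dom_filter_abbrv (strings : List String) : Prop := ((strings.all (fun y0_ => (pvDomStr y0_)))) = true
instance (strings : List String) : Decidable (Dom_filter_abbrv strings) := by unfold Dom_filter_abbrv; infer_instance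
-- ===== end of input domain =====

-- B replaces A's all-pairs value-inequality scan by a sort of the distinct strings by
-- length (longest first) scanned group-by-group against the strictly longer ones (alternative decomposition).

-- ===== PORT A =====
def filter_abbrv (strings : List String) : List String :=
  let to_remove := strings.foldl (fun acc s1 =>
    if strings.any (fun s2 => s1 != s2 && PySem.Str.isIn s1 s2) then acc ++ [s1] else acc) []
  strings.filter (fun s => !(to_remove.contains s))

-- ===== PORT B =====
-- the two while-loops of Source B: peel off the maximal group of strings of the head's length,
-- test each group member against the already-seen strictly longer strings, recurse on the rest
def pvGroupScan (fuel : Nat) (longer removed : List String) (uniq : List String) : List String :=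
  match fuel, uniq with
  | _, [] => removed
  | 0, _ => removed  -- unreachable: called with fuel = uniq.length (structural fuel, totality only)
  | fuel + 1, s :: rest =>
    let grp := List.takeWhile (fun t => PySem.Str.len t == PySem.Str.len s) (s :: rest)
    pvGroupScan fuel (longer ++ grp)
      (grp.foldl (fun rem x => if longer.any (fun t => PySem.Str.isIn x t) then PySem.Set.add rem x else rem) removed)
      (List.dropWhile (fun t => PySem.Str.len t == PySem.Str.len s) (s :: rest))

def filter_abbrv_alt (strings : List String) : List String :=
  let uniq := PySem.List.sorted (PySem.List.dedup strings) (fun s => PySem.Str.len s) true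
  let removed := pvGroupScan uniq.length [] [] uniq
  strings.filter (fun s => !(PySem.Set.contains removed s))

-- ===== PRECONDITION & SPEC =====
def Spec_filter_abbrv (strings : List String) (out : List String) : Prop := out = filter_abbrv_alt strings
instance (strings : List String) (out : List String) : Decidable (Spec_filter_abbrv strings out) := by unfold Spec_filter_abbrv; infer_instance

-- ===== CLAIM (what is proved, stated in full; the proofs are below) =====
def Claim_equal_filter_abbrv : Prop := ∀ (strings : List String), Dom_filter_abbrv strings → Spec_filter_abbrv strings (filter_abbrv strings)

-- ===== LEMMAS AND PROOFS =====

-- a string is an infix of a DIFFERENT string iff it is an infix of a STRICTLY LONGER one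
theorem pv_cond_iff (s t : String) :
    (s ≠ t ∧ s.toList <:+: t.toList) ↔
    (s.toList.length < t.toList.length ∧ s.toList <:+: t.toList) := by
  constructor
  · rintro ⟨hne, hinf⟩
    refine ⟨?_, hinf⟩
    rcases Nat.lt_or_ge s.toList.length t.toList.length with h | h
    · exact h
    · exact absurd (String.toList_inj.mp (hinf.eq_of_length (Nat.le_antisymm hinf.length_le h))) hne
  · rintro ⟨hlt, hinf⟩
    refine ⟨?_, hinf⟩
    rintro rfl
    exact Nat.lt_irrefl _ hlt

-- membership in the inner for-loop's accumulated removed-set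
theorem pv_mem_foldl_add (c : String → Bool) (grp removed : List String) (s : String) :
    s ∈ grp.foldl (fun rem x => if c x then PySem.Set.add rem x else rem) removed ↔
    s ∈ removed ∨ (s ∈ grp ∧ c s = true) := by
  induction grp generalizing removed with
  | nil => simp
  | cons x xs ih =>
    simp only [List.foldl_cons]
    by_cases hc : c x = true
    · simp only [hc, if_true, ih, PySem.Set.mem_add, List.mem_cons]
      constructor
      · rintro ((h | rfl) | ⟨h1, h2⟩)
        · exact Or.inl h
        · exact Or.inr ⟨Or.inl rfl, hc⟩
        · exact Or.inr ⟨Or.inr h1, h2⟩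
      · rintro (h | ⟨(rfl | h1), h2⟩)
        · exact Or.inl (Or.inl h)
        · exact Or.inl (Or.inr rfl)
        · exact Or.inr ⟨h1, h2⟩
    · simp only [hc, ih, List.mem_cons]
      constructor
      · rintro (h | ⟨h1, h2⟩)
        · exact Or.inl h
        · exact Or.inr ⟨Or.inr h1, h2⟩
      · rintro (h | ⟨(rfl | h1), h2⟩)
        · exact Or.inl h
        · exact absurd h2 hc
        · exact Or.inr ⟨h1, h2⟩

-- after dropping the maximal equal-length prefix, everything remaining is strictly shorter
theorem pv_dropWhile_lt (P : String → Bool) (l : List String) (L : Nat)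
    (hP : ∀ t, P t = true ↔ t.toList.length = L)
    (hord : l.Pairwise (fun a b => b.toList.length ≤ a.toList.length))
    (hle : ∀ u ∈ l, u.toList.length ≤ L) :
    ∀ u ∈ List.dropWhile P l, u.toList.length < L := by
  induction l with
  | nil => simp
  | cons y ys ih =>
    by_cases hy : P y = true
    · rw [List.dropWhile_cons_of_pos hy]
      exact ih (List.pairwise_cons.mp hord).2 (fun u hu => hle u (List.mem_cons_of_mem y hu))
    · rw [List.dropWhile_cons_of_neg hy]
      intro u hu
      have hylt : y.toList.length < L := by
        refine lt_of_le_of_ne (hle y (List.mem_cons_self ..)) ?_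
        intro h; exact hy ((hP y).mpr h)
      rcases List.mem_cons.mp hu with rfl | hu'
      · exact hylt
      · exact lt_of_le_of_lt ((List.pairwise_cons.mp hord).1 u hu') hylt

-- invariant of the group scan: a string lands in the removed set iff it already was there,
-- or it occurs in the remaining list and is an infix of a strictly longer string of the universe
theorem pvGroupScan_mem (n : Nat) : ∀ (uniq longer removed : List String), uniq.length ≤ n →
    uniq.Pairwise (fun a b => b.toList.length ≤ a.toList.length) →
    (∀ t ∈ longer, ∀ u ∈ uniq, u.toList.length < t.toList.length) →
    ∀ s, s ∈ pvGroupScan n longer removed uniq ↔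
      s ∈ removed ∨ (s ∈ uniq ∧ ∃ t, (t ∈ longer ∨ t ∈ uniq) ∧
        s.toList.length < t.toList.length ∧ PySem.Str.isIn s t = true) := by
  induction n with
  | zero =>
    intro uniq longer removed hlen _ _ s
    have hnil : uniq = [] := List.eq_nil_of_length_eq_zero (Nat.le_zero.mp hlen)
    subst hnil
    simp [pvGroupScan]
  | succ n ih =>
    intro uniq longer removed hlen hord hlonger s
    match uniq with
    | [] => simp [pvGroupScan]
    | x :: rest =>
      simp only [pvGroupScan]
      generalize hgrpdef : List.takeWhile (fun t => PySem.Str.len t == PySem.Str.len x) (x :: rest) = grp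
      generalize hrestdef : List.dropWhile (fun t => PySem.Str.len t == PySem.Str.len x) (x :: rest) = rest'
      have hsplit : grp ++ rest' = x :: rest := by
        rw [← hgrpdef, ← hrestdef]; exact List.takeWhile_append_dropWhile
      have hgrp : ∀ u ∈ grp, u.toList.length = x.toList.length := by
        intro u hu; rw [← hgrpdef] at hu
        have := List.mem_takeWhile_imp hu
        simpa [PySem.Str.len_eq] using this
      have hdrop : rest' = List.dropWhile (fun t => PySem.Str.len t == PySem.Str.len x) rest := by
        rw [← hrestdef, List.dropWhile_cons_of_pos (by simp)]
      have hsubrest : rest'.Sublist rest := by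
        rw [hdrop]; exact List.dropWhile_sublist _
      have hrest_lt : ∀ u ∈ rest', u.toList.length < x.toList.length := by
        rw [hdrop]
        exact pv_dropWhile_lt _ rest x.toList.length (by intro t; simp [PySem.Str.len_eq])
          (List.pairwise_cons.mp hord).2 (List.pairwise_cons.mp hord).1
      have hord' : rest'.Pairwise (fun a b => b.toList.length ≤ a.toList.length) :=
        List.Pairwise.sublist (hsubrest.trans (List.sublist_cons_self x rest)) hord
      have hlonger' : ∀ t ∈ longer ++ grp, ∀ u ∈ rest', u.toList.length < t.toList.length := by
        intro t ht u hu
        rcases List.mem_append.mp ht with ht | ht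
        · exact hlonger t ht u (List.mem_cons_of_mem x (hsubrest.subset hu))
        · exact (hgrp t ht) ▸ hrest_lt u hu
      have hlen' : rest'.length ≤ n := by
        rw [hdrop]
        exact le_trans (List.length_dropWhile_le _ rest) (Nat.succ_le_succ_iff.mp hlen)
      have hmem : ∀ z : String, z ∈ x :: rest ↔ z ∈ grp ∨ z ∈ rest' := by
        intro z; rw [← hsplit, List.mem_append]
      rw [ih rest' (longer ++ grp) _ hlen' hord' hlonger' s, pv_mem_foldl_add]
      constructor
      · rintro ((hR | ⟨hG, hANY⟩) | ⟨hRm, t, htm, hlt, hin⟩)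
        · exact Or.inl hR
        · rcases List.any_eq_true.mp hANY with ⟨t, ht, hin⟩
          refine Or.inr ⟨(hmem s).mpr (Or.inl hG), t, Or.inl ht, ?_, hin⟩
          exact hlonger t ht s ((hmem s).mpr (Or.inl hG))
        · refine Or.inr ⟨(hmem s).mpr (Or.inr hRm), t, ?_, hlt, hin⟩
          rcases htm with htm | htm
          · rcases List.mem_append.mp htm with h | h
            · exact Or.inl h
            · exact Or.inr ((hmem t).mpr (Or.inl h))
          · exact Or.inr ((hmem t).mpr (Or.inr htm))
      · rintro (hR | ⟨hsm, t, htm, hlt, hin⟩)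
        · exact Or.inl (Or.inl hR)
        · rcases (hmem s).mp hsm with hsG | hsR
          · have htl : t ∈ longer := by
              rcases htm with h | h
              · exact h
              · exfalso
                rcases (hmem t).mp h with h' | h'
                · have h1 := hgrp t h'; have hsx := hgrp s hsG; omega
                · have h1 := hrest_lt t h'; have hsx := hgrp s hsG; omega
            exact Or.inl (Or.inr ⟨hsG, List.any_eq_true.mpr ⟨t, htl, hin⟩⟩)
          · refine Or.inr ⟨hsR, t, ?_, hlt, hin⟩
            rcases htm with h | h
            · exact Or.inl (List.mem_append.mpr (Or.inl h))
            · rcases (hmem t).mp h with h' | h'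
              · exact Or.inl (List.mem_append.mpr (Or.inr h'))
              · exact Or.inr h'

-- the two removal conditions coincide for members of `strings`
theorem pv_contains_eq (strings : List String) (s : String) (hs : s ∈ strings) :
    (List.filter (fun s1 => strings.any fun s2 => s1 != s2 && PySem.Str.isIn s1 s2) strings).contains s
    = PySem.Set.contains
        (pvGroupScan (PySem.List.sorted (PySem.List.dedup strings) (fun s => PySem.Str.len s) true).length [] []
          (PySem.List.sorted (PySem.List.dedup strings) (fun s => PySem.Str.len s) true)) s := by
  set uniq := PySem.List.sorted (PySem.List.dedup strings) (fun s => PySem.Str.len s) true with huniq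
  have hord : uniq.Pairwise (fun a b => b.toList.length ≤ a.toList.length) := by
    refine (PySem.List.sorted_pairwise_rev (PySem.List.dedup strings) (fun s => PySem.Str.len s)).imp ?_
    intro a b h
    simpa [PySem.Str.len_eq] using h
  have hmemu : ∀ t : String, t ∈ uniq ↔ t ∈ strings := by
    intro t
    rw [huniq, PySem.List.mem_sorted, PySem.List.mem_dedup]
  rw [Bool.eq_iff_iff, List.contains_iff_mem, PySem.Set.contains_iff, List.mem_filter,
    pvGroupScan_mem uniq.length uniq [] [] le_rfl hord (by simp) s]
  simp only [List.not_mem_nil, false_or, List.any_eq_true, Bool.and_eq_true,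
    bne_iff_ne, PySem.Str.isIn_iff_infix, hmemu, hs, true_and]
  constructor
  · rintro ⟨t, ht, hne, hinf⟩
    exact ⟨t, ht, (pv_cond_iff s t).mp ⟨hne, hinf⟩⟩
  · rintro ⟨t, ht, hlt, hinf⟩
    exact ⟨t, ht, (pv_cond_iff s t).mpr ⟨hlt, hinf⟩⟩

-- ===== VERDICT (by name: the statement is the Claim_ definition above) =====
theorem filter_abbrv_spec : Claim_equal_filter_abbrv := by
  intro strings _
  show filter_abbrv strings = filter_abbrv_alt strings
  unfold filter_abbrv filter_abbrv_alt
  rw [PySem.List.foldl_append_if]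
  simp only [List.nil_append, List.map_id']
  refine List.filter_congr ?_
  intro s hs
  rw [pv_contains_eq strings s hs]
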